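-- pv_equiv track=rewrite | github.com/vuminhph/randomCodes | dollar_sign_deletion.py | is_dollar_delete_equal
-- ===== SOURCE A (Python) =====
-- def is_dollar_delete_equal(arr):
--     dollar_str = arr[0]
--     non_dollar_str = arr[1]
--
--     dollar_locs = []
--     for i in range(len(dollar_str)):
--         if dollar_str[i] == '$':
--             dollar_locs.append(i)
--
--     for i in range(len(dollar_str)):
--         if i - 1 not in dollar_locs and i not in dollar_locs:
--             if dollar_str[i] not in non_dollar_str:
--                 return False
--     return True
-- ===== SOURCE B (Python) =====
-- def is_dollar_delete_equal(arr):
--     dollar_str = arr[0]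
--     non_dollar_str = arr[1]
--     prev_dollar = False
--     for c in dollar_str:
--         if c == '$':
--             prev_dollar = True
--         elif prev_dollar:
--             prev_dollar = False
--         else:
--             if c not in non_dollar_str:
--                 return False
--             prev_dollar = False
--     return True
-- ===== Notes on version B (the rewrite author's own statement) =====
-- stated objective: simpler
-- what changed: Replaced A's two passes (build a list of dollar positions, then rescan testing 'i-1 in list' and 'i in list') by a single left-to-right pass over the string tracking a boolean prev_dollar flag.
-- outside the precondition, e.g. on is_dollar_delete_equal(['a']): A raises IndexError, B raises IndexError
import Mathlib
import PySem

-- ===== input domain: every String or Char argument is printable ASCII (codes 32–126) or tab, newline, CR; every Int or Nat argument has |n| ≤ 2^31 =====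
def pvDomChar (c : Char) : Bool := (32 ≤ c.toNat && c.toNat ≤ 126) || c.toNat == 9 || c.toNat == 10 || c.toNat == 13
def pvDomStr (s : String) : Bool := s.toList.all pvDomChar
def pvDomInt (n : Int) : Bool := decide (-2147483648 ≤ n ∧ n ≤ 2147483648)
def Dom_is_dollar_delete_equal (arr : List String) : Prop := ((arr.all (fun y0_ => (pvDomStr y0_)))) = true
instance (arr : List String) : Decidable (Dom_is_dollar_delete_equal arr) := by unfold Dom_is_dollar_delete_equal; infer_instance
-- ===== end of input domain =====

-- B replaces A's two-pass build-dollar-positions-then-rescan with a single pass tracking a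
-- prev_dollar flag (simpler: no positions list, no membership tests on it). A raises
-- IndexError when arr has fewer than 2 elements; Pre_ requires 2 ≤ arr.length.


-- ===== PORT A =====
-- dollar_locs: first loop of A, appending each index whose char is '$' (indices as Int,
-- matching Python's 'i - 1 not in dollar_locs' test where i-1 may be -1).
def aDollarLocs (cs : List Char) : List Int :=
  (List.range cs.length).foldl
    (fun acc i => if cs.getD i ' ' = '$' then acc ++ [(i : Int)] else acc) []

-- second loop of A with early return False
def aScan (cs nd : List Char) (locs : List Int) : List Nat → Bool
  | [] => true
  | i :: rest =>
    if ¬ ((i : Int) - 1 ∈ locs) ∧ ¬ ((i : Int) ∈ locs) then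
      if ¬ (cs.getD i ' ' ∈ nd) then false else aScan cs nd locs rest
    else aScan cs nd locs rest

def is_dollar_delete_equal (arr : List String) : Bool :=
  match arr with
  | s0 :: s1 :: _ =>
    let cs := s0.toList
    aScan cs s1.toList (aDollarLocs cs) (List.range cs.length)
  | _ => false  -- unreachable under Pre_ (Python raises IndexError)

-- ===== PORT B =====
-- single pass with the prev_dollar flag
def bLoop (nd : List Char) : List Char → Bool → Bool
  | [], _ => true
  | c :: rest, prev =>
    if c = '$' then bLoop nd rest true
    else if prev then bLoop nd rest false
    else if ¬ (c ∈ nd) then false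
    else bLoop nd rest false

def is_dollar_delete_equal_alt (arr : List String) : Bool :=
  match arr with
  | [] => false  -- unreachable under Pre_ (Python raises IndexError)
  | s0 :: rest =>
    match rest with
    | [] => false  -- unreachable under Pre_ (Python raises IndexError)
    | s1 :: _ => bLoop s1.toList s0.toList false

-- ===== PRECONDITION & SPEC =====
-- Pre_: Python A evaluates arr[0] and arr[1], raising IndexError when arr has < 2 elements.
def Pre_is_dollar_delete_equal (arr : List String) : Prop := 2 ≤ arr.length
instance (arr : List String) : Decidable (Pre_is_dollar_delete_equal arr) := by
  unfold Pre_is_dollar_delete_equal; infer_instance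
def pvWitness_is_dollar_delete_equal : List String := ["a$b", "ac"]

def Spec_is_dollar_delete_equal (arr : List String) (out : Bool) : Prop := out = is_dollar_delete_equal_alt arr
instance (arr : List String) (out : Bool) : Decidable (Spec_is_dollar_delete_equal arr out) := by unfold Spec_is_dollar_delete_equal; infer_instance

-- ===== CLAIM (what is proved, stated in full; the proofs are below) =====
def Claim_equal_is_dollar_delete_equal : Prop := ∀ (arr : List String), Dom_is_dollar_delete_equal arr → Pre_is_dollar_delete_equal arr → Spec_is_dollar_delete_equal arr (is_dollar_delete_equal arr)

-- ===== LEMMAS AND PROOFS =====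

theorem foldl_append_if_filter {α β : Type} (p : α → Prop) [DecidablePred p] (f : α → β) :
    ∀ (l : List α) (acc : List β),
      l.foldl (fun a x => if p x then a ++ [f x] else a) acc
        = acc ++ (l.filter (fun x => decide (p x))).map f := by
  intro l
  induction l with
  | nil => simp
  | cons x xs ih =>
    intro acc
    simp only [List.foldl_cons, List.filter_cons]
    by_cases h : p x <;> simp [h, ih]

theorem mem_aDollarLocs (cs : List Char) (j : Int) :
    (j ∈ aDollarLocs cs) ↔ ∃ i : Nat, i < cs.length ∧ cs.getD i ' ' = '$' ∧ j = (i : Int) := by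
  unfold aDollarLocs
  rw [foldl_append_if_filter]
  simp only [List.nil_append, List.mem_map, List.mem_filter, List.mem_range, decide_eq_true_eq]
  constructor
  · rintro ⟨i, ⟨hi, hp⟩, rfl⟩; exact ⟨i, hi, hp, rfl⟩
  · rintro ⟨i, hi, hp, rfl⟩; exact ⟨i, ⟨hi, hp⟩, rfl⟩

theorem nat_mem_aDollarLocs (cs : List Char) (i : Nat) (hi : i < cs.length) :
    ((i : Int) ∈ aDollarLocs cs) ↔ cs.getD i ' ' = '$' := by
  rw [mem_aDollarLocs]
  constructor
  · rintro ⟨k, _, hp, hk⟩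
    have : k = i := by omega
    subst this; exact hp
  · intro hp; exact ⟨i, hi, hp, rfl⟩

-- main invariant: aScan over the remaining indices equals bLoop over the remaining chars,
-- with prev = "position k-1 exists and holds '$'"
theorem scan_eq_loop (cs nd : List Char) :
    ∀ (m k : Nat), k + m = cs.length →
      aScan cs nd (aDollarLocs cs) (List.range' k m)
        = bLoop nd (cs.drop k) (decide (0 < k ∧ cs.getD (k - 1) ' ' = '$')) := by
  intro m
  induction m with
  | zero =>
    intro k hk
    have : cs.drop k = [] := by
      apply List.drop_eq_nil_of_le; omega
    simp [this, aScan, bLoop]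
  | succ m ih =>
    intro k hk
    have hklt : k < cs.length := by omega
    have hdrop : cs.drop k = cs.getD k ' ' :: cs.drop (k + 1) := by
      rw [List.getD_eq_getElem _ _ hklt]
      exact (List.getElem_cons_drop hklt).symm
    have hrec := ih (k + 1) (by omega)
    have hkk : k + 1 - 1 = k := rfl
    have hfalse : cs.getD k ' ' ≠ '$' →
        decide (0 < k + 1 ∧ cs.getD (k + 1 - 1) ' ' = '$') = false := by
      intro hcur
      rw [hkk, decide_eq_false_iff_not]
      rintro ⟨-, h⟩; exact hcur h
    rw [show List.range' k (m + 1) = k :: List.range' (k + 1) m from rfl, hdrop]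
    simp only [aScan, bLoop]
    by_cases hcur : cs.getD k ' ' = '$'
    · -- current char is '$': both skip; prev becomes true
      have hmem : ((k : Int) ∈ aDollarLocs cs) := (nat_mem_aDollarLocs cs k hklt).2 hcur
      rw [if_neg (fun h => h.2 hmem), if_pos hcur, hrec, hkk]
      congr 1
      rw [hcur]; simp
    · by_cases hprev : 0 < k ∧ cs.getD (k - 1) ' ' = '$'
      · -- previous char was '$': both skip; prev becomes false
        have hmem : ((k : Int) - 1 ∈ aDollarLocs cs) := by
          rw [mem_aDollarLocs]
          exact ⟨k - 1, by omega, hprev.2, by omega⟩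
        rw [if_neg (fun h => h.1 hmem), if_neg hcur, if_pos (decide_eq_true hprev),
            hrec, hfalse hcur]
      · -- ordinary char: both test membership in nd
        have hmem1 : ¬ ((k : Int) - 1 ∈ aDollarLocs cs) := by
          rw [mem_aDollarLocs]
          rintro ⟨i, hi, hp, hik⟩
          have hk0 : 0 < k := by omega
          have : i = k - 1 := by omega
          subst this
          exact hprev ⟨hk0, hp⟩
        have hmem2 : ¬ ((k : Int) ∈ aDollarLocs cs) := by
          rw [nat_mem_aDollarLocs cs k hklt]; exact hcur
        rw [if_pos ⟨hmem1, hmem2⟩, if_neg hcur,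
            if_neg (fun h => hprev (of_decide_eq_true h))]
        by_cases hnd : cs.getD k ' ' ∈ nd
        · rw [if_neg (not_not_intro hnd), if_neg (not_not_intro hnd), hrec, hfalse hcur]
        · rw [if_pos hnd, if_pos hnd]

-- ===== VERDICT (by name: the statement is the Claim_ definition above) =====
theorem is_dollar_delete_equal_spec : Claim_equal_is_dollar_delete_equal := by
  intro arr _ hpre
  unfold Spec_is_dollar_delete_equal
  match arr with
  | s0 :: s1 :: rest =>
    show is_dollar_delete_equal (s0 :: s1 :: rest) = is_dollar_delete_equal_alt (s0 :: s1 :: rest)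
    have h := scan_eq_loop s0.toList s1.toList s0.toList.length 0 (by omega)
    simpa [is_dollar_delete_equal, is_dollar_delete_equal_alt, List.range_eq_range'] using h
  | [] => exact absurd hpre (by simp [Pre_is_dollar_delete_equal])
  | [_] => exact absurd hpre (by simp [Pre_is_dollar_delete_equal])
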